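-- pv_equiv track=rewrite | github.com/miliar/Code_Jam_Webscraper | solutions_python/solutions_year16_round0_nr2/3865.py | flips_required
-- ===== SOURCE A (Python) =====
-- def flips_required(stack):
--     last_orientation = '+'
--     num_flips = 0
--
--     for c in stack[::-1]:
--         if c != last_orientation:
--             last_orientation = c
--             num_flips += 1
--
--     return num_flips
-- ===== SOURCE B (Python) =====
-- def flips_required(stack):
--     # Compress the stack into maximal runs of equal elements, then use arithmetic:
--     # (#runs - 1) internal transitions, plus 1 if the top-of-iteration side (stack[-1]) is not '+'.
--     runs = []
--     for c in stack:
--         if not runs or runs[-1] != c: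
--             runs.append(c)
--     if not runs:
--         return 0
--     return len(runs) - 1 + (1 if stack[-1] != '+' else 0)
-- ===== Notes on version B (the rewrite author's own statement) =====
-- stated objective: alternative
-- what changed: Replaces the reversed stateful last-orientation scan with a forward run-length compression of the stack plus a closed-form count: (number of runs - 1) internal transitions plus 1 if stack[-1] != '+'.
import Mathlib
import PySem

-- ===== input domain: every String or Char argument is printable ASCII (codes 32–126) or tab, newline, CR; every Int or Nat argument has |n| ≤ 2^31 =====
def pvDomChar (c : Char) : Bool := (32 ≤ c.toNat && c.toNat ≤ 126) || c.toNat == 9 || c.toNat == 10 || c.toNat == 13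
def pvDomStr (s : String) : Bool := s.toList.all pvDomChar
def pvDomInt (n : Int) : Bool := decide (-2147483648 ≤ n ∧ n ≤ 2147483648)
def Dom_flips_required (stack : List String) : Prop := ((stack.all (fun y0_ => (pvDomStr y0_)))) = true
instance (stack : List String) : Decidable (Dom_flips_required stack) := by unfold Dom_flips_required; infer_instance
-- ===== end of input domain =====

-- Header: B replaces A's reversed stateful scan by forward run-compression + arithmetic; objective: alternative.


-- ===== PORT A =====
-- for c in stack[::-1]: state (last_orientation, num_flips)
def flips_required (stack : List String) : Int :=
  let rev := (PySem.List.slice? stack none none (-1)).getD []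
  (rev.foldl (fun (st : String × Int) c => if c ≠ st.1 then (c, st.2 + 1) else st) ("+", 0)).2

-- ===== PORT B =====
-- run-compression loop from Source B
def flips_required_alt (stack : List String) : Int :=
  let runs := stack.foldl (fun (runs : List String) c =>
      if runs = [] ∨ runs.getLast? ≠ some c then runs ++ [c] else runs) []
  if runs = [] then 0
  else (runs.length : Int) - 1 + (if PySem.List.pyGet? stack (-1) ≠ some "+" then 1 else 0)

-- ===== PRECONDITION & SPEC =====
def Spec_flips_required (stack : List String) (out : Int) : Prop := out = flips_required_alt stack
instance (stack : List String) (out : Int) : Decidable (Spec_flips_required stack out) := by unfold Spec_flips_required; infer_instance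

-- ===== CLAIM (what is proved, stated in full; the proofs are below) =====
def Claim_equal_flips_required : Prop := ∀ (stack : List String), Dom_flips_required stack → Spec_flips_required stack (flips_required stack)

-- ===== LEMMAS AND PROOFS =====

-- number of orientation changes starting from `last`
def chgFrom (last : String) : List String → Int
  | [] => 0
  | c :: cs => (if c ≠ last then 1 else 0) + chgFrom c cs

theorem foldlA_snd (l : List String) : ∀ (last : String) (n : Int),
    (l.foldl (fun (st : String × Int) c => if c ≠ st.1 then (c, st.2 + 1) else st) (last, n)).2
      = n + chgFrom last l := by
  induction l with
  | nil => intro last n; simp [chgFrom]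
  | cons c cs ih =>
      intro last n
      simp only [List.foldl]
      by_cases h : c = last
      · rw [if_neg (by simp [h])]
        rw [ih]
        simp [chgFrom, h]
      · rw [if_pos (by simp [h])]
        rw [ih]
        simp [chgFrom, h]
        ring

theorem foldlB_len (l : List String) : ∀ (acc : List String) (k : String),
    acc.getLast? = some k →
    ((l.foldl (fun (runs : List String) c =>
        if runs = [] ∨ runs.getLast? ≠ some c then runs ++ [c] else runs) acc).length : Int)
      = acc.length + chgFrom k l := by
  induction l with
  | nil => intro acc k _; simp [chgFrom]
  | cons c cs ih =>
      intro acc k hk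
      have hne : acc ≠ [] := by intro h; simp [h] at hk
      by_cases h : c = k
      · have hcond : ¬ (acc = [] ∨ acc.getLast? ≠ some c) := by
          simp [hne, hk, h]
        simp only [List.foldl, if_neg hcond]
        rw [ih acc k hk]
        simp [chgFrom, h]
      · have hcond : (acc = [] ∨ acc.getLast? ≠ some c) := by
          right; rw [hk]; intro hh; exact h (Option.some.inj hh).symm
        simp only [List.foldl, if_pos hcond]
        rw [ih (acc ++ [c]) c (by simp)]
        simp [chgFrom, h]
        ring

theorem foldlB_ne_nil (l : List String) : ∀ (acc : List String), acc ≠ [] →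
    l.foldl (fun (runs : List String) c =>
        if runs = [] ∨ runs.getLast? ≠ some c then runs ++ [c] else runs) acc ≠ [] := by
  induction l with
  | nil => intro acc h; simpa using h
  | cons c cs ih =>
      intro acc h
      simp only [List.foldl]
      by_cases hc : acc = [] ∨ acc.getLast? ≠ some c
      · rw [if_pos hc]; exact ih _ (by simp)
      · rw [if_neg hc]; exact ih _ h

theorem chgFrom_append (ys : List String) : ∀ (last a : String),
    chgFrom last (ys ++ [a]) = chgFrom last ys + (if a ≠ ys.getLast?.getD last then 1 else 0) := by
  induction ys with
  | nil => intro last a; simp [chgFrom]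
  | cons c t ih =>
      intro last a
      simp only [List.cons_append, chgFrom, ih c a]
      have hgd : (c :: t).getLast?.getD last = t.getLast?.getD c := by
        cases t with
        | nil => simp
        | cons d u =>
            obtain ⟨x, hx⟩ := Option.isSome_iff_exists.mp
              (List.getLast?_isSome.mpr (List.cons_ne_nil d u))
            simp [List.getLast?_cons_cons, hx]
      rw [hgd]
      ring

theorem chgFrom_reverse (l : List String) : ∀ (a last : String),
    chgFrom last (a :: l).reverse
      = chgFrom a l + (if (a :: l).getLast?.getD "" ≠ last then 1 else 0) := by
  induction l with
  | nil => intro a last; simp [chgFrom]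
  | cons b t ih =>
      intro a last
      have hrev : (a :: b :: t).reverse = (b :: t).reverse ++ [a] := by simp
      rw [hrev, chgFrom_append, ih b last]
      have hgl : ((b :: t).reverse.getLast?).getD last = b := by
        rw [List.getLast?_reverse]; simp
      rw [hgl]
      have hgd : (a :: b :: t).getLast?.getD "" = (b :: t).getLast?.getD "" := by
        simp [List.getLast?_cons_cons]
      rw [hgd]
      simp only [chgFrom]
      have hne : ((if a ≠ b then (1:Int) else 0) = (if b ≠ a then 1 else 0)) := by
        simp only [ne_comm]
      rw [hne]; ring

-- ===== VERDICT (by name: the statement is the Claim_ definition above) =====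
theorem flips_required_spec : Claim_equal_flips_required := by
  intro stack _
  unfold Spec_flips_required flips_required flips_required_alt
  rw [PySem.List.slice?_none_none_neg_one]
  simp only [Option.getD_some]
  cases stack with
  | nil => simp
  | cons a l =>
      rw [foldlA_snd]
      have h1 : (a :: l).foldl (fun (runs : List String) c =>
          if runs = [] ∨ runs.getLast? ≠ some c then runs ++ [c] else runs) []
          = l.foldl (fun (runs : List String) c =>
          if runs = [] ∨ runs.getLast? ≠ some c then runs ++ [c] else runs) [a] := by
        simp [List.foldl]
      rw [h1]
      have hlen := foldlB_len l [a] a (by simp)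
      have hne := foldlB_ne_nil l [a] (by simp)
      rw [if_neg hne, hlen]
      rw [chgFrom_reverse]
      rw [PySem.List.pyGet?_neg_one]
      have hgl : (a :: l).getLast? = some ((a :: l).getLast?.getD "") := by
        obtain ⟨x, hx⟩ := Option.isSome_iff_exists.mp
          (List.getLast?_isSome.mpr (List.cons_ne_nil a l))
        simp [hx]
      rw [hgl]
      by_cases h : (a :: l).getLast?.getD "" = "+"
      · simp [h]
      · simp [h]
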